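-- pv_equiv track=rewrite | github.com/KajorSuchodolski/SISE | main.py | create_goal_board
-- ===== SOURCE A (Python) =====
-- def create_goal_board(w, k):
--     goal_board = []
--     numbers = []
--
--     for i in range(1, w * k):     # create a list of numbers 1...w*k and append 0
--         numbers.append(i)
--     numbers.append(0)
--
--     numbers_iter = iter(numbers)
--
--     for i in range(0, w):
--         row = []
--         for j in range(0, k):
--             row.append(next(numbers_iter))
--
--         goal_board.append(row)
--
--     return goal_board
-- ===== SOURCE B (Python) =====
-- def create_goal_board(w, k):
--     # each cell directly from its coordinates: (i*k+j+1) % (w*k) is 1..w*k-1 and 0 at the last cell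
--     return [[(i * k + j + 1) % (w * k) for j in range(k)] for i in range(w)]
-- ===== Notes on version B (the rewrite author's own statement) =====
-- stated objective: simpler
-- what changed: Each cell is computed by a closed-form formula (i*k+j+1) mod (w*k) directly from its coordinates, instead of materializing a flat 1..w*k-1,0 list and threading a shared iterator across rows.
import Mathlib
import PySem

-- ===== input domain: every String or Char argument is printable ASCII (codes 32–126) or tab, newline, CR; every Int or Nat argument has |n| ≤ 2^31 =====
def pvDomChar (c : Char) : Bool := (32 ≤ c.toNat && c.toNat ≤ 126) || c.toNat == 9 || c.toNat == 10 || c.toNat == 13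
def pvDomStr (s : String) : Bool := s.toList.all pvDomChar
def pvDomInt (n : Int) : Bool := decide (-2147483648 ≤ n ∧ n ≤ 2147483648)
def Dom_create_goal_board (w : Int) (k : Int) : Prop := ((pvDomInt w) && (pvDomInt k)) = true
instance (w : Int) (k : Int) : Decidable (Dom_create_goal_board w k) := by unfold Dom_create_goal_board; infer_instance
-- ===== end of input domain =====

-- B computes each cell by a closed-form formula from its coordinates instead of
-- building a flat 1..w*k-1,0 list and threading a shared iterator (objective: simpler).

-- ===== PORT A =====
-- literal transliteration: build `numbers`, then consume it as an iterator row by row.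
-- The `[]` branch of the match (Python's StopIteration) is never reached: when w,k > 0 the
-- iterator holds exactly w*k elements and exactly w*k `next` calls are made; otherwise none.
-- (each Python `list.append` is O(1); its Lean counterpart accumulates with cons and
-- reverses once at the end of the loop — the same elements in the same order, linear time)
def create_goal_board (w : Int) (k : Int) : List (List Int) :=
  let numbers : List Int := ((PySem.List.pyRange 1 (w*k) 1).foldl (fun ns i => i :: ns) []).reverse
  let numbers := numbers ++ [0]
  let st := (PySem.List.pyRange 0 w 1).foldl
    (fun (st : List (List Int) × List Int) _i =>
      let inner := (PySem.List.pyRange 0 k 1).foldl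
        (fun (st2 : List Int × List Int) _j =>
          match st2.2 with
          | x :: rest => (x :: st2.1, rest)
          | [] => (st2.1, []))
        (([] : List Int), st.2)
      (inner.1.reverse :: st.1, inner.2))
    (([] : List (List Int)), numbers)
  st.1.reverse

-- ===== PORT B =====
def create_goal_board_alt (w : Int) (k : Int) : List (List Int) :=
  (PySem.List.pyRange 0 w 1).map (fun i =>
    (PySem.List.pyRange 0 k 1).map (fun j => PySem.Int.mod (i * k + j + 1) (w * k)))

-- ===== PRECONDITION & SPEC =====
def Spec_create_goal_board (w : Int) (k : Int) (out : List (List Int)) : Prop := out = create_goal_board_alt w k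
instance (w : Int) (k : Int) (out : List (List Int)) : Decidable (Spec_create_goal_board w k out) := by unfold Spec_create_goal_board; infer_instance

-- ===== CLAIM (what is proved, stated in full; the proofs are below) =====
def Claim_equal_create_goal_board : Prop := ∀ (w : Int) (k : Int), Dom_create_goal_board w k → Spec_create_goal_board w k (create_goal_board w k)

-- ===== LEMMAS AND PROOFS =====

-- proof-only helper: the list of rows of width K carved off the front of `it`
def rowsOf (K : Nat) : Nat → List Int → List (List Int)
  | 0, _ => []
  | m+1, it => it.take K :: rowsOf K m (it.drop K)

theorem foldl_cons_rev (l acc : List Int) :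
    l.foldl (fun a x => x :: a) acc = l.reverse ++ acc := by
  induction l generalizing acc with
  | nil => simp
  | cons x l ih => simp [List.foldl_cons, ih]

-- the inner loop consumes `c.length` elements from the iterator
theorem inner_fold (c : List Int) (acc it : List Int) :
    c.foldl (fun (st2 : List Int × List Int) _j =>
        match st2.2 with
        | x :: rest => (x :: st2.1, rest)
        | [] => (st2.1, [])) (acc, it)
      = ((it.take c.length).reverse ++ acc, it.drop c.length) := by
  induction c generalizing acc it with
  | nil => simp
  | cons _ c ih =>
    cases it with
    | nil => simp [List.foldl_cons, ih]
    | cons x rest => simp [List.foldl_cons, ih]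

-- the outer loop produces `c.length` rows of width K
theorem outer_fold (k : Int) (c : List Int) (gb : List (List Int)) (it : List Int) :
    c.foldl (fun (st : List (List Int) × List Int) _i =>
        let inner := (PySem.List.pyRange 0 k 1).foldl
          (fun (st2 : List Int × List Int) _j =>
            match st2.2 with
            | x :: rest => (x :: st2.1, rest)
            | [] => (st2.1, []))
          (([] : List Int), st.2)
        (inner.1.reverse :: st.1, inner.2)) (gb, it)
      = ((rowsOf k.toNat c.length it).reverse ++ gb, it.drop (c.length * k.toNat)) := by
  induction c generalizing gb it with
  | nil => simp [rowsOf]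
  | cons _ c ih =>
    rw [List.foldl_cons, ih]
    simp only [inner_fold, PySem.List.length_pyRange_one]
    have h : ((c.length + 1) * k.toNat) = k.toNat + c.length * k.toNat := by ring
    simp [rowsOf, List.drop_drop, h, List.append_assoc]

theorem rowsOf_zero (m : Nat) (it : List Int) :
    rowsOf 0 m it = List.replicate m ([] : List Int) := by
  induction m generalizing it with
  | zero => simp [rowsOf]
  | succ m ih => simp [rowsOf, ih, List.replicate_succ]

-- carving rows of width K off a mapped arithmetic sequence gives the row formulas
theorem rowsOf_range' (K : Nat) (f : Nat → Int) (m s : Nat) :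
    rowsOf K m ((List.range' s (m * K)).map f)
      = (List.range m).map (fun i => (List.range K).map (fun j => f (s + i * K + j))) := by
  induction m generalizing s with
  | zero => simp [rowsOf]
  | succ m ih =>
    have hsplit : List.range' s ((m + 1) * K) = List.range' s K ++ List.range' (s + K) (m * K) := by
      have h1 : (m + 1) * K = K + m * K := by ring
      rw [h1, ← List.range'_append_1]
    rw [hsplit, List.map_append, rowsOf]
    have hlen : ((List.range' s K).map f).length = K := by simp
    rw [List.take_left' hlen, List.drop_left' hlen, ih (s + K)]
    rw [List.range_succ_eq_map, List.map_cons]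
    congr 1
    · rw [List.range'_eq_map_range]
      simp
    · rw [List.map_map]
      refine List.map_congr_left (fun i _ => ?_)
      refine List.map_congr_left (fun j _ => ?_)
      congr 1
      simp [Nat.succ_eq_add_one]
      ring

-- ===== VERDICT (by name: the statement is the Claim_ definition above) =====
-- the flat numbers list is exactly the cell formula applied to 0..w*k-1 (when w,k > 0)
theorem numbers_eq (w k : Int) (hw : 0 < w) (hk : 0 < k) :
    PySem.List.pyRange 1 (w * k) 1 ++ [0]
      = (List.range (w.toNat * k.toNat)).map
          (fun m : Nat => PySem.Int.mod ((m : Int) + 1) (w * k)) := by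
  have hN : ((w.toNat * k.toNat : Nat) : Int) = w * k := by
    push_cast; rw [Int.toNat_of_nonneg hw.le, Int.toNat_of_nonneg hk.le]
  have hNpos : 0 < w.toNat * k.toNat := Nat.mul_pos (by omega) (by omega)
  have hNpos' : 0 < w * k := by positivity
  obtain ⟨V, hV⟩ : ∃ V, w.toNat * k.toNat = V + 1 := ⟨w.toNat * k.toNat - 1, by omega⟩
  rw [hV, List.range_succ, List.map_append, PySem.List.pyRange_one]
  have hV' : (w * k - 1).toNat = V := by omega
  rw [hV']
  congr 1
  · refine List.map_congr_left (fun t ht => ?_)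
    have ht' : t < V := List.mem_range.mp ht
    have h1 : (0 : Int) ≤ (t : Int) + 1 := by positivity
    have h2 : (t : Int) + 1 < w * k := by omega
    rw [PySem.Int.mod_eq_emod_of_pos hNpos', Int.emod_eq_of_lt h1 h2]
    ring
  · have : ((V : Int) + 1) = w * k := by omega
    simp [this, PySem.Int.mod_eq_emod_of_pos hNpos']

theorem create_goal_board_spec : Claim_equal_create_goal_board := by
  intro w k _
  unfold Spec_create_goal_board create_goal_board create_goal_board_alt
  simp only [foldl_cons_rev, List.append_nil, List.reverse_reverse, outer_fold,
    PySem.List.length_pyRange_one]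
  by_cases hw : 0 < w
  · by_cases hk : 0 < k
    · -- main case: w, k > 0
      have hkK : ((k.toNat : Nat) : Int) = k := Int.toNat_of_nonneg hk.le
      have h0 : (w - 0 : Int).toNat = w.toNat := by omega
      have h1 : (k - 0 : Int).toNat = k.toNat := by omega
      rw [numbers_eq w k hw hk, List.range_eq_range', PySem.List.pyRange_one,
        PySem.List.pyRange_one, h0, h1, rowsOf_range' k.toNat _ w.toNat 0, List.map_map]
      refine List.map_congr_left (fun i _ => ?_)
      simp only [Function.comp]
      rw [List.map_map]
      refine List.map_congr_left (fun j _ => ?_)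
      simp only [Function.comp]
      congr 1
      push_cast [hkK]
      ring
    · -- k ≤ 0: every row is empty
      have hk0 : k.toNat = 0 := by omega
      have hk1 : (k - 0 : Int).toNat = 0 := by omega
      have hw1 : (w - 0 : Int).toNat = w.toNat := by omega
      rw [hk0, rowsOf_zero, PySem.List.pyRange_one, PySem.List.pyRange_one, hk1, hw1]
      simp only [List.range_zero, List.map_nil, List.map_map, Function.comp_def]
      rw [List.map_const', List.length_range]
  · -- w ≤ 0: no rows at all
    have hw0 : (w - 0 : Int).toNat = 0 := by omega
    rw [hw0, PySem.List.pyRange_one_eq_nil (by omega : w ≤ 0)]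
    simp [rowsOf]
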